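-- pv_equiv track=rewrite | github.com/antimatter-ai-org/guardrails | app/guardrails.py | _pending_placeholder_prefix_len
-- ===== SOURCE A (Python) =====
-- def _pending_placeholder_prefix_len(text: str, placeholders: dict[str, str]) -> int:
--     if not text or not placeholders:
--         return 0
--     max_placeholder_len = max((len(placeholder) for placeholder in placeholders), default=0)
--     max_suffix = min(max(0, max_placeholder_len - 1), len(text))
--     for suffix_len in range(max_suffix, 0, -1):
--         suffix = text[-suffix_len:]
--         if any(placeholder.startswith(suffix) for placeholder in placeholders):
--             return suffix_len
--     return 0
-- ===== SOURCE B (Python) =====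
-- def _pending_placeholder_prefix_len(text: str, placeholders: dict[str, str]) -> int:
--     if not placeholders:
--         return 0
--     best = 0
--     cap = min(max(map(len, placeholders)) - 1, len(text))
--     for p in placeholders:
--         for L in range(min(cap, len(p)), best, -1):
--             if text.endswith(p[:L]):
--                 best = L
--                 break
--     return best
-- ===== Notes on version B (the rewrite author's own statement) =====
-- stated objective: alternative
-- what changed: Outer loop is over placeholders instead of suffix lengths: a running best is kept and each placeholder is scanned per-placeholder from min(cap, len(p)) down only to best+1 with an early break, instead of testing every suffix length against all placeholders.
import Mathlib
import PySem

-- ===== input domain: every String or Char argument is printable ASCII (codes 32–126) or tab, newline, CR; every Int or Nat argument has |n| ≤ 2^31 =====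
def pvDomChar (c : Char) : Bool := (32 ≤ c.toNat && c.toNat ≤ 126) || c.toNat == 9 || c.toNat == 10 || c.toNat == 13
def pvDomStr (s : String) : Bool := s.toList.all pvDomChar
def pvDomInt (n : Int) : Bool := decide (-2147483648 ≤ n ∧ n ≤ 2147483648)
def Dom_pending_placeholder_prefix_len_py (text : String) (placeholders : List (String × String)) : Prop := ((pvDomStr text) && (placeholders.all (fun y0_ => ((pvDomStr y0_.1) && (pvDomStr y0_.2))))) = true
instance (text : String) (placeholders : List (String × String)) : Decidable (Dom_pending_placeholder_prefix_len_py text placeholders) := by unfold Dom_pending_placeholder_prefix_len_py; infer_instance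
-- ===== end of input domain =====

-- B restructures the search: instead of testing each suffix length against all placeholders,
-- it keeps a running best over an outer loop on placeholders, scanning each one from
-- min(cap, len(p)) down to best+1 with an early break (objective: alternative decomposition).

-- ===== PORT A =====
-- the 'for suffix_len in range(max_suffix, 0, -1): … return suffix_len' loop of A
def pvLoopA (text : String) (phs : List (String × String)) : Nat → Int
  | 0 => 0
  | (n+1) =>
      let suffix := PySem.Str.slice text (some (-((n+1 : Nat) : Int))) none
      if phs.any (fun p => PySem.Str.startswith p.1 suffix) then ((n+1 : Nat) : Int)
      else pvLoopA text phs n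

def pending_placeholder_prefix_len_py (text : String) (placeholders : List (String × String)) : Int :=
  if text == "" || placeholders == [] then 0
  else
    let maxlen : Int := ((PySem.List.max? (placeholders.map (fun p => PySem.Str.len p.1)) (fun x => x)).getD 0)
    let maxSuffix : Int := min (max 0 (maxlen - 1)) (PySem.Str.len text)
    pvLoopA text placeholders maxSuffix.toNat

-- ===== PORT B =====
-- the 'for L in range(min(cap, len(p)), best, -1): … best = L; break' inner loop of B
def pvInnerB (text : String) (p : String) (best : Nat) : Nat → Nat
  | 0 => best
  | (L+1) =>
      if L + 1 ≤ best then best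
      else if PySem.Str.endswith text (PySem.Str.slice p none (some ((L+1 : Nat) : Int))) then L + 1
      else pvInnerB text p best L

def pending_placeholder_prefix_len_py_alt (text : String) (placeholders : List (String × String)) : Int :=
  if placeholders == [] then 0
  else
    let cap : Int := min (((PySem.List.max? (placeholders.map (fun p => PySem.Str.len p.1)) (fun x => x)).getD 0) - 1) (PySem.Str.len text)
    ((placeholders.foldl (fun best p => pvInnerB text p.1 best (min cap (PySem.Str.len p.1)).toNat) 0 : Nat) : Int)

-- ===== PRECONDITION & SPEC =====
def Spec_pending_placeholder_prefix_len_py (text : String) (placeholders : List (String × String)) (out : Int) : Prop := out = pending_placeholder_prefix_len_py_alt text placeholders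
instance (text : String) (placeholders : List (String × String)) (out : Int) : Decidable (Spec_pending_placeholder_prefix_len_py text placeholders out) := by unfold Spec_pending_placeholder_prefix_len_py; infer_instance

-- ===== CLAIM (what is proved, stated in full; the proofs are below) =====
def Claim_equal_pending_placeholder_prefix_len_py : Prop := ∀ (text : String) (placeholders : List (String × String)), Dom_pending_placeholder_prefix_len_py text placeholders → Spec_pending_placeholder_prefix_len_py text placeholders (pending_placeholder_prefix_len_py text placeholders)

-- ===== LEMMAS AND PROOFS =====

-- QA L: A's loop test at suffix length L
def pvQA (text : String) (phs : List (String × String)) (L : Nat) : Prop :=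
  (phs.any (fun p => PySem.Str.startswith p.1 (PySem.Str.slice text (some (-(L : Int))) none))) = true

-- QB p L: B's inner test
def pvQB (text : String) (p : String) (L : Nat) : Prop :=
  (PySem.Str.endswith text (PySem.Str.slice p none (some (L : Int)))) = true

-- characterization of A's loop
theorem pvLoopA_spec (text : String) (phs : List (String × String)) (n : Nat) :
    (pvLoopA text phs n = 0 ∨ ∃ L : Nat, pvLoopA text phs n = (L : Int) ∧ 1 ≤ L ∧ L ≤ n ∧ pvQA text phs L)
    ∧ (∀ L : Nat, 1 ≤ L → L ≤ n → pvQA text phs L → (L : Int) ≤ pvLoopA text phs n) := by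
  induction n with
  | zero => exact ⟨Or.inl rfl, by intro L h1 h2 _; omega⟩
  | succ n ih =>
    have hstep : pvLoopA text phs (n+1) =
        if (phs.any (fun p => PySem.Str.startswith p.1 (PySem.Str.slice text (some (-((n+1 : Nat) : Int))) none))) = true
        then ((n+1 : Nat) : Int) else pvLoopA text phs n := by
      simp only [pvLoopA]
    by_cases h : (phs.any (fun p => PySem.Str.startswith p.1 (PySem.Str.slice text (some (-((n+1 : Nat) : Int))) none))) = true
    · constructor
      · right; exact ⟨n+1, by rw [hstep, if_pos h], by omega, le_refl _, h⟩
      · intro L h1 h2 _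
        rw [hstep, if_pos h]; exact_mod_cast h2
    · have hrec : pvLoopA text phs (n+1) = pvLoopA text phs n := by rw [hstep, if_neg h]
      constructor
      · rcases ih.1 with h0 | ⟨L, hL, h1, h2, hq⟩
        · exact Or.inl (by rw [hrec]; exact h0)
        · exact Or.inr ⟨L, by rw [hrec]; exact hL, h1, by omega, hq⟩
      · intro L h1 h2 hq
        rw [hrec]
        rcases Nat.lt_or_ge L (n+1) with hlt | hge
        · exact ih.2 L h1 (by omega) hq
        · exfalso; have : L = n+1 := by omega
          subst this; exact h hq

theorem pvLoopA_nonneg (text : String) (phs : List (String × String)) (n : Nat) :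
    0 ≤ pvLoopA text phs n := by
  rcases (pvLoopA_spec text phs n).1 with h | ⟨L, hL, _⟩
  · omega
  · rw [hL]; exact Int.natCast_nonneg L

-- characterization of B's inner loop
theorem pvInnerB_spec (text p : String) (best fuel : Nat) :
    best ≤ pvInnerB text p best fuel
    ∧ (pvInnerB text p best fuel = best ∨
        (best < pvInnerB text p best fuel ∧ pvInnerB text p best fuel ≤ fuel ∧ pvQB text p (pvInnerB text p best fuel)))
    ∧ (∀ L : Nat, best < L → L ≤ fuel → pvQB text p L → L ≤ pvInnerB text p best fuel) := by
  induction fuel with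
  | zero => exact ⟨le_refl _, Or.inl rfl, by intro L h1 h2 _; omega⟩
  | succ n ih =>
    have hstep : pvInnerB text p best (n+1) =
        if n + 1 ≤ best then best
        else if (PySem.Str.endswith text (PySem.Str.slice p none (some ((n+1 : Nat) : Int)))) = true
        then n + 1 else pvInnerB text p best n := by
      simp only [pvInnerB]
    by_cases hb : n + 1 ≤ best
    · have h : pvInnerB text p best (n+1) = best := by rw [hstep, if_pos hb]
      exact ⟨by rw [h], Or.inl h, by intro L h1 h2 _; omega⟩
    · by_cases hq : (PySem.Str.endswith text (PySem.Str.slice p none (some ((n+1 : Nat) : Int)))) = true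
      · have h : pvInnerB text p best (n+1) = n + 1 := by rw [hstep, if_neg hb, if_pos hq]
        have hk : best < n + 1 := by omega
        refine ⟨by omega, Or.inr ⟨by omega, by omega, ?_⟩, by intro L h1 h2 _; omega⟩
        rw [h]; exact hq
      · have h : pvInnerB text p best (n+1) = pvInnerB text p best n := by rw [hstep, if_neg hb, if_neg hq]
        refine ⟨by rw [h]; exact ih.1, ?_, ?_⟩
        · rw [h]
          rcases ih.2.1 with h0 | ⟨a, hbb, c⟩
          · exact Or.inl h0
          · exact Or.inr ⟨a, by omega, c⟩
        intro L h1 h2 hQ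
        rw [h]
        rcases Nat.lt_or_ge L (n+1) with hlt | hge
        · exact ih.2.2 L h1 (by omega) hQ
        · exfalso; have : L = n+1 := by omega
          subst this; exact hq hQ

-- characterization of B's fold over placeholders
theorem pvFoldB_spec (text : String) (hi : String × String → Nat) (ps : List (String × String)) :
    ∀ best : Nat,
    best ≤ ps.foldl (fun b p => pvInnerB text p.1 b (hi p)) best
    ∧ (ps.foldl (fun b p => pvInnerB text p.1 b (hi p)) best = best ∨
        (best < ps.foldl (fun b p => pvInnerB text p.1 b (hi p)) best ∧
         ∃ p ∈ ps, ps.foldl (fun b p => pvInnerB text p.1 b (hi p)) best ≤ hi p ∧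
           pvQB text p.1 (ps.foldl (fun b p => pvInnerB text p.1 b (hi p)) best)))
    ∧ (∀ p ∈ ps, ∀ L : Nat, best < L → L ≤ hi p → pvQB text p.1 L →
        L ≤ ps.foldl (fun b p => pvInnerB text p.1 b (hi p)) best) := by
  induction ps with
  | nil => exact fun best => ⟨le_refl _, Or.inl rfl, by intro p hp; simp at hp⟩
  | cons q rest ih =>
    intro best
    have hin := pvInnerB_spec text q.1 best (hi q)
    set b1 := pvInnerB text q.1 best (hi q) with hb1
    have ihf := ih b1
    simp only [List.foldl_cons]
    rw [← hb1]
    refine ⟨le_trans hin.1 ihf.1, ?_, ?_⟩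
    · rcases ihf.2.1 with h0 | ⟨hlt, p, hp, hle, hQ⟩
      · rw [h0]
        rcases hin.2.1 with h1 | ⟨hlt1, hle1, hQ1⟩
        · exact Or.inl h1
        · exact Or.inr ⟨hlt1, q, by simp, hle1, hQ1⟩
      · refine Or.inr ⟨lt_of_le_of_lt hin.1 hlt, p, by simp [hp], hle, hQ⟩
    · intro p hp L h1 h2 hQ
      rcases List.mem_cons.mp hp with rfl | hp'
      · rcases Nat.lt_or_ge best L with _ | _
        · exact le_trans (hin.2.2 L h1 h2 hQ) ihf.1
        · omega
      · rcases Nat.lt_or_ge b1 L with hlt | hge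
        · exact ihf.2.2 p hp' L hlt h2 hQ
        · exact le_trans hge ihf.1

-- bridge: A's 'placeholder.startswith(text[-L:])' vs B's 'text.endswith(p[:L])' at list level
theorem pvBridge (tl pl : List Char) (L : Nat) (hL : L ≤ tl.length) :
    (tl.drop (tl.length - L) <+: pl) ↔ (pl.take L <:+ tl ∧ L ≤ pl.length) := by
  have hlen : (tl.drop (tl.length - L)).length = L := by
    rw [List.length_drop]; omega
  constructor
  · intro h
    have htake : tl.drop (tl.length - L) = pl.take L := by
      have := List.prefix_iff_eq_take.mp h
      rw [hlen] at this; exact this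
    refine ⟨?_, ?_⟩
    · rw [← htake]; exact List.drop_suffix _ _
    · have := h.length_le; rw [hlen] at this; exact this
  · rintro ⟨h1, h2⟩
    have hlen2 : (pl.take L).length = L := by
      rw [List.length_take]; omega
    obtain ⟨u, hu⟩ := h1
    have hud : tl.drop (tl.length - L) = pl.take L := by
      have hulen : u.length = tl.length - L := by
        have := congrArg List.length hu
        simp [List.length_append, hlen2] at this
        omega
      rw [← hu]
      have harith : (u ++ pl.take L).length - L = u.length := by
        simp [List.length_append, hlen2]
      rw [harith, List.drop_left]
    rw [hud]
    exact List.prefix_iff_eq_take.mpr (by rw [hlen2])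

-- pvQA unfolded to list form
theorem pvQA_iff (text : String) (phs : List (String × String)) (L : Nat) (h1 : 1 ≤ L)
    (hL : L ≤ text.toList.length) :
    pvQA text phs L ↔ ∃ p ∈ phs, pvQB text p.1 L ∧ L ≤ p.1.toList.length := by
  unfold pvQA
  rw [List.any_eq_true]
  constructor
  · rintro ⟨p, hp, hq⟩
    refine ⟨p, hp, ?_⟩
    rw [PySem.Str.startswith_eq, PySem.Str.toList_slice,
        PySem.Chars.slice_eq_listSlice, PySem.List.slice_from_neg_natCast _ L h1,
        PySem.Chars.startswith_iff] at hq
    have := (pvBridge text.toList p.1.toList L hL).mp hq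
    refine ⟨?_, this.2⟩
    unfold pvQB
    rw [PySem.Str.endswith_eq, PySem.Str.toList_slice, PySem.Chars.slice_eq_listSlice,
        PySem.List.slice_to_natCast, PySem.Chars.endswith_iff]
    exact this.1
  · rintro ⟨p, hp, hq, hlen⟩
    refine ⟨p, hp, ?_⟩
    unfold pvQB at hq
    rw [PySem.Str.endswith_eq, PySem.Str.toList_slice, PySem.Chars.slice_eq_listSlice,
        PySem.List.slice_to_natCast, PySem.Chars.endswith_iff] at hq
    rw [PySem.Str.startswith_eq, PySem.Str.toList_slice,
        PySem.Chars.slice_eq_listSlice, PySem.List.slice_from_neg_natCast _ L h1,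
        PySem.Chars.startswith_iff]
    exact (pvBridge text.toList p.1.toList L hL).mpr ⟨hq, hlen⟩

-- arithmetic facts about the caps (standalone, for omega)
theorem pvArith1 (m t : Int) (ht : 0 ≤ t) : (((min (max 0 (m - 1)) t).toNat : Int)) ≤ t := by omega

theorem pvArith2 (m t q : Int) (ht : 0 ≤ t) (_hq : 0 ≤ q) (b : Nat)
    (h : b ≤ (min (min (m - 1) t) q).toNat) : b ≤ (min (max 0 (m - 1)) t).toNat := by omega

theorem pvArith3 (m t q : Int) (L : Nat) (h1 : 1 ≤ L) (h2 : L ≤ (min (max 0 (m - 1)) t).toNat)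
    (h3 : (L : Int) ≤ q) : L ≤ (min (min (m - 1) t) q).toNat := by omega

theorem pvArith4 (m t q : Int) (hq : 0 ≤ q) (b : Nat)
    (h : b ≤ (min (min (m - 1) t) q).toNat) : (b : Int) ≤ q := by omega

theorem pvArith5 (m t q : Int) (ht : 0 ≤ t) (b : Nat)
    (h : b ≤ (min (min (m - 1) t) q).toNat) : (b : Int) ≤ t := by omega

-- the core equality: A's descending scan equals B's fold, for any nonneg maxlen
theorem pvCore (text : String) (phs : List (String × String)) (maxlen : Int) (_hml : 0 ≤ maxlen) :
    pvLoopA text phs (min (max 0 (maxlen - 1)) (PySem.Str.len text)).toNat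
      = ((phs.foldl (fun b p =>
            pvInnerB text p.1 b (min (min (maxlen - 1) (PySem.Str.len text)) (PySem.Str.len p.1)).toNat) 0 : Nat) : Int) := by
  have hlenT : PySem.Str.len text = (text.toList.length : Int) := PySem.Str.len_eq text
  have hlenT0 : 0 ≤ PySem.Str.len text := by rw [hlenT]; exact Int.natCast_nonneg _
  have hlenP : ∀ p : String × String, PySem.Str.len p.1 = (p.1.toList.length : Int) :=
    fun p => PySem.Str.len_eq p.1
  have hlenP0 : ∀ p : String × String, 0 ≤ PySem.Str.len p.1 := by
    intro p; rw [hlenP p]; exact Int.natCast_nonneg _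
  have hfold := pvFoldB_spec text
      (fun p => (min (min (maxlen - 1) (PySem.Str.len text)) (PySem.Str.len p.1)).toNat) phs 0
  have hA := pvLoopA_spec text phs (min (max 0 (maxlen - 1)) (PySem.Str.len text)).toNat
  apply le_antisymm
  · rcases hA.1 with h0 | ⟨L, hL, h1, h2, hq⟩
    · rw [h0]; exact Int.natCast_nonneg _
    · rw [hL]
      have hLlen : L ≤ text.toList.length := by
        have h3 : (L : Int) ≤ PySem.Str.len text :=
          le_trans (by exact_mod_cast h2) (pvArith1 maxlen _ hlenT0)
        rw [hlenT] at h3; exact_mod_cast h3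
      obtain ⟨p, hp, hQB, hplen⟩ := (pvQA_iff text phs L h1 hLlen).mp hq
      have hLhi : L ≤ (min (min (maxlen - 1) (PySem.Str.len text)) (PySem.Str.len p.1)).toNat :=
        pvArith3 maxlen _ _ L h1 h2 (by rw [hlenP p]; exact_mod_cast hplen)
      exact_mod_cast hfold.2.2 p hp L h1 hLhi hQB
  · rcases hfold.2.1 with h0 | ⟨hlt0, p, hp, hle, hQ⟩
    · rw [h0]; exact_mod_cast pvLoopA_nonneg text phs _
    · have h1 : 1 ≤ phs.foldl (fun b p =>
          pvInnerB text p.1 b (min (min (maxlen - 1) (PySem.Str.len text)) (PySem.Str.len p.1)).toNat) 0 := hlt0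
      have h2 := pvArith2 maxlen (PySem.Str.len text) (PySem.Str.len p.1) hlenT0 (hlenP0 p) _ hle
      have hblen : phs.foldl (fun b p =>
          pvInnerB text p.1 b (min (min (maxlen - 1) (PySem.Str.len text)) (PySem.Str.len p.1)).toNat) 0
            ≤ p.1.toList.length := by
        have h3 := pvArith4 maxlen (PySem.Str.len text) (PySem.Str.len p.1) (hlenP0 p) _ hle
        rw [hlenP p] at h3; exact_mod_cast h3
      have hbtl : phs.foldl (fun b p =>
          pvInnerB text p.1 b (min (min (maxlen - 1) (PySem.Str.len text)) (PySem.Str.len p.1)).toNat) 0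
            ≤ text.toList.length := by
        have h3 := pvArith5 maxlen (PySem.Str.len text) (PySem.Str.len p.1) hlenT0 _ hle
        rw [hlenT] at h3; exact_mod_cast h3
      exact hA.2 _ h1 h2 ((pvQA_iff text phs _ h1 hbtl).mpr ⟨p, hp, hQ, hblen⟩)

-- maxlen (a max of string lengths, default 0) is nonnegative
theorem pvMaxlen_nonneg (phs : List (String × String)) :
    0 ≤ (PySem.List.max? (phs.map (fun p => PySem.Str.len p.1)) (fun x => x)).getD 0 := by
  cases hm : PySem.List.max? (phs.map (fun p => PySem.Str.len p.1)) (fun x => x) with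
  | none => simp
  | some m =>
    have hmem := PySem.List.max?_mem hm
    obtain ⟨p, _, hp⟩ := List.mem_map.mp hmem
    simp only [Option.getD_some]
    rw [← hp, PySem.Str.len_eq]
    exact Int.natCast_nonneg _

-- ===== VERDICT (by name: the statement is the Claim_ definition above) =====
set_option maxHeartbeats 1000000 in
theorem pending_placeholder_prefix_len_py_spec : Claim_equal_pending_placeholder_prefix_len_py := by
  intro text placeholders _
  unfold Spec_pending_placeholder_prefix_len_py
  unfold pending_placeholder_prefix_len_py pending_placeholder_prefix_len_py_alt
  by_cases hemp : placeholders = []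
  · simp [hemp]
  · have he : (placeholders == []) = false := by
      simp [hemp]
    simp only [he, Bool.or_false]
    have hcore := pvCore text placeholders _ (pvMaxlen_nonneg placeholders)
    by_cases htext : text = ""
    · have ht : (text == "") = true := by simp [htext]
      simp only [ht, if_true]
      have hzero : (min (max 0 (((PySem.List.max? (placeholders.map (fun p => PySem.Str.len p.1)) (fun x => x)).getD 0) - 1)) (PySem.Str.len text)).toNat = 0 := by
        have h0 : PySem.Str.len text = 0 := by
          rw [PySem.Str.len_eq, htext]; simp
        rw [h0]; omega
      rw [hzero] at hcore
      exact hcore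
    · have ht : (text == "") = false := by simp [htext]
      simp only [ht]
      exact hcore
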